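-- pv_equiv track=rewrite | github.com/nguyenhuuthang-tt5/orc | backend/read_img/read_img.py | get_hospital_name
-- ===== SOURCE A (Python) =====
-- def get_hospital_name(str_list: list, hos_dict: dict, res_string_list: list):
--     result = ''
--     length = 0
--     for string in str_list:
--         for k, v in hos_dict.items():
--             if length <= len(str(string)) and 'BENH VIEN' in string:
--                 if string in k  or k in string:
--                     result = v
--                     length = len(string)
--     return result
-- ===== SOURCE B (Python) =====
-- def get_hospital_name(str_list: list, hos_dict: dict, res_string_list: list):
--     # Pass 1: collect qualifying strings ('BENH VIEN' in them and some key matches),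
--     # each paired with the value of its LAST matching key.
--     qualified = []
--     for string in str_list:
--         if 'BENH VIEN' in string:
--             value = None
--             for k, v in hos_dict.items():
--                 if string in k or k in string:
--                     value = v
--             if value is not None:
--                 qualified.append((string, value))
--     if not qualified:
--         return ''
--     # Pass 2: the LAST qualifying string of maximal length wins.
--     m = max(len(s) for s, _ in qualified)
--     result = ''
--     for s, v in qualified:
--         if len(s) == m:
--             result = v
--     return result
-- ===== Notes on version B (the rewrite author's own statement) =====
-- stated objective: simpler
-- what changed: B replaces A's nested overwrite loop with running length state by a filter-then-select decomposition: one pass collects qualifying strings with their last matching dict value, then the last one of maximal length is chosen; the 'BENH VIEN' membership test is hoisted out of the key loop, so non-qualifying strings skip the dict scan entirely.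
import Mathlib
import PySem

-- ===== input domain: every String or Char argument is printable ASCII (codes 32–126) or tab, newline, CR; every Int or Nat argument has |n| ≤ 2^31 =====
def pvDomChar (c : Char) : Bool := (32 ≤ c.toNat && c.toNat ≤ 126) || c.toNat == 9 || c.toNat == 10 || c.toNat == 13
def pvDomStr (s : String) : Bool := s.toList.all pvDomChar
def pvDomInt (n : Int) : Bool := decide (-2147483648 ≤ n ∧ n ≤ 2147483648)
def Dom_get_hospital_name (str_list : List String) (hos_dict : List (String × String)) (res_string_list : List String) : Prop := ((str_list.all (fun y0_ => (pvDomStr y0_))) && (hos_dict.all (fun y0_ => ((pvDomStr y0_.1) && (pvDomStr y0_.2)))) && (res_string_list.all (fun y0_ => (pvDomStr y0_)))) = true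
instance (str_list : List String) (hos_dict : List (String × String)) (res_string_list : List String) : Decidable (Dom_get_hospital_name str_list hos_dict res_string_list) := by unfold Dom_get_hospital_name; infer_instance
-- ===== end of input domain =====

-- ===== PORT A =====
-- B restates A's nested overwrite loop as filter-then-select (collect qualifying strings with
-- their last matching value, then pick the last one of maximal length); objective: simpler.
def get_hospital_name (str_list : List String) (hos_dict : List (String × String)) (res_string_list : List String) : String :=
  (str_list.foldl (fun (acc : String × Int) string =>
    hos_dict.foldl (fun (acc2 : String × Int) kv =>
      if acc2.2 ≤ PySem.Str.len string ∧ PySem.Str.isIn "BENH VIEN" string = true then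
        if PySem.Str.isIn string kv.1 = true ∨ PySem.Str.isIn kv.1 string = true then
          (kv.2, PySem.Str.len string)
        else acc2
      else acc2) acc) ("", 0)).1

-- ===== PORT B =====
-- value of the LAST key k of hos_dict with (s in k or k in s), as in Source B's inner loop
def pvLastMatch (hos_dict : List (String × String)) (s : String) : Option String :=
  hos_dict.foldl (fun value kv =>
    if PySem.Str.isIn s kv.1 = true ∨ PySem.Str.isIn kv.1 s = true then some kv.2 else value) none

def get_hospital_name_alt (str_list : List String) (hos_dict : List (String × String)) (res_string_list : List String) : String :=
  let qualified : List (String × String) := str_list.foldl (fun q s =>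
    if PySem.Str.isIn "BENH VIEN" s = true then
      match pvLastMatch hos_dict s with
      | some v => q ++ [(s, v)]
      | none => q
    else q) []
  if qualified = [] then ""
  else
    -- Python's max over the (nonempty) lengths; lengths are ≥ 0, so a fold of max from 0 is exact
    let m : Int := (qualified.map (fun p => PySem.Str.len p.1)).foldl max 0
    qualified.foldl (fun r p => if PySem.Str.len p.1 = m then p.2 else r) ""

-- ===== PRECONDITION & SPEC =====
def Spec_get_hospital_name (str_list : List String) (hos_dict : List (String × String)) (res_string_list : List String) (out : String) : Prop := out = get_hospital_name_alt str_list hos_dict res_string_list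
instance (str_list : List String) (hos_dict : List (String × String)) (res_string_list : List String) (out : String) : Decidable (Spec_get_hospital_name str_list hos_dict res_string_list out) := by unfold Spec_get_hospital_name; infer_instance

-- ===== CLAIM (what is proved, stated in full; the proofs are below) =====
def Claim_equal_get_hospital_name : Prop := ∀ (str_list : List String) (hos_dict : List (String × String)) (res_string_list : List String), Dom_get_hospital_name str_list hos_dict res_string_list → Spec_get_hospital_name str_list hos_dict res_string_list (get_hospital_name str_list hos_dict res_string_list)

-- ===== LEMMAS AND PROOFS =====

-- the per-qualifier step of A's loop: overwrite when the running length allows it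
def pvStep (acc : String × Int) (p : String × String) : String × Int :=
  if acc.2 ≤ PySem.Str.len p.1 then (p.2, PySem.Str.len p.1) else acc

-- the qualifier list B builds, as a filterMap
def pvQual (hos_dict : List (String × String)) (l : List String) : List (String × String) :=
  l.filterMap (fun s =>
    if PySem.Str.isIn "BENH VIEN" s = true then (pvLastMatch hos_dict s).map (fun v => (s, v)) else none)

def pvMax (q : List (String × String)) : Int := (q.map (fun p => PySem.Str.len p.1)).foldl max 0

def pvPick (q : List (String × String)) (m : Int) : String :=
  q.foldl (fun r p => if PySem.Str.len p.1 = m then p.2 else r) ""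

theorem pvLastMatch_init (d : List (String × String)) (s : String) (o : Option String) :
    d.foldl (fun value kv => if PySem.Str.isIn s kv.1 = true ∨ PySem.Str.isIn kv.1 s = true then some kv.2 else value) o
      = (match pvLastMatch d s with | some v => some v | none => o) := by
  induction d generalizing o with
  | nil => rfl
  | cons kv d ih =>
      have h1 : pvLastMatch (kv :: d) s
          = d.foldl (fun value kv => if PySem.Str.isIn s kv.1 = true ∨ PySem.Str.isIn kv.1 s = true then some kv.2 else value)
              (if PySem.Str.isIn s kv.1 = true ∨ PySem.Str.isIn kv.1 s = true then some kv.2 else none) := rfl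
      rw [List.foldl_cons, ih, h1, ih]
      by_cases hk : PySem.Str.isIn s kv.1 = true ∨ PySem.Str.isIn kv.1 s = true
      · rw [if_pos hk, if_pos hk]
        cases pvLastMatch d s <;> rfl
      · rw [if_neg hk, if_neg hk]
        cases pvLastMatch d s <;> rfl

-- A's inner loop when the string does not contain 'BENH VIEN': a no-op
theorem pvInner_notBV (d : List (String × String)) (s : String) (acc : String × Int)
    (h : ¬ PySem.Str.isIn "BENH VIEN" s = true) :
    d.foldl (fun (acc2 : String × Int) kv =>
      if acc2.2 ≤ PySem.Str.len s ∧ PySem.Str.isIn "BENH VIEN" s = true then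
        if PySem.Str.isIn s kv.1 = true ∨ PySem.Str.isIn kv.1 s = true then
          (kv.2, PySem.Str.len s)
        else acc2
      else acc2) acc = acc := by
  induction d generalizing acc with
  | nil => rfl
  | cons kv d ih =>
      rw [List.foldl_cons, if_neg (fun hc => h hc.2)]
      exact ih acc

-- A's inner loop when the running length already exceeds len s: a no-op
theorem pvInner_gt (d : List (String × String)) (s : String) (acc : String × Int)
    (h : ¬ acc.2 ≤ PySem.Str.len s) :
    d.foldl (fun (acc2 : String × Int) kv =>
      if acc2.2 ≤ PySem.Str.len s ∧ PySem.Str.isIn "BENH VIEN" s = true then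
        if PySem.Str.isIn s kv.1 = true ∨ PySem.Str.isIn kv.1 s = true then
          (kv.2, PySem.Str.len s)
        else acc2
      else acc2) acc = acc := by
  induction d generalizing acc with
  | nil => rfl
  | cons kv d ih =>
      rw [List.foldl_cons, if_neg (fun hc => h hc.1)]
      exact ih acc h

-- A's inner loop in the live case: the last matching key's value wins
theorem pvInner_live (d : List (String × String)) (s : String) (acc : String × Int)
    (hBV : PySem.Str.isIn "BENH VIEN" s = true) (hle : acc.2 ≤ PySem.Str.len s) :
    d.foldl (fun (acc2 : String × Int) kv =>
      if acc2.2 ≤ PySem.Str.len s ∧ PySem.Str.isIn "BENH VIEN" s = true then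
        if PySem.Str.isIn s kv.1 = true ∨ PySem.Str.isIn kv.1 s = true then
          (kv.2, PySem.Str.len s)
        else acc2
      else acc2) acc
      = (match pvLastMatch d s with | some v => (v, PySem.Str.len s) | none => acc) := by
  induction d generalizing acc with
  | nil => rfl
  | cons kv d ih =>
      have h1 : pvLastMatch (kv :: d) s
          = d.foldl (fun value kv => if PySem.Str.isIn s kv.1 = true ∨ PySem.Str.isIn kv.1 s = true then some kv.2 else value)
              (if PySem.Str.isIn s kv.1 = true ∨ PySem.Str.isIn kv.1 s = true then some kv.2 else none) := rfl
      rw [List.foldl_cons, if_pos ⟨hle, hBV⟩, h1, pvLastMatch_init]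
      by_cases hk : PySem.Str.isIn s kv.1 = true ∨ PySem.Str.isIn kv.1 s = true
      · rw [if_pos hk, ih (kv.2, PySem.Str.len s) le_rfl]
        cases pvLastMatch d s with
        | some v => rfl
        | none => rw [if_pos hk]
      · rw [if_neg hk, ih acc hle]
        cases pvLastMatch d s with
        | some v => rfl
        | none => rw [if_neg hk]

theorem pvInner_live_some (d : List (String × String)) (s : String) (acc : String × Int) (v : String)
    (hBV : PySem.Str.isIn "BENH VIEN" s = true) (hle : acc.2 ≤ PySem.Str.len s)
    (hlm : pvLastMatch d s = some v) :
    d.foldl (fun (acc2 : String × Int) kv =>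
      if acc2.2 ≤ PySem.Str.len s ∧ PySem.Str.isIn "BENH VIEN" s = true then
        if PySem.Str.isIn s kv.1 = true ∨ PySem.Str.isIn kv.1 s = true then
          (kv.2, PySem.Str.len s)
        else acc2
      else acc2) acc = (v, PySem.Str.len s) := by
  rw [pvInner_live d s acc hBV hle, hlm]

theorem pvInner_live_none (d : List (String × String)) (s : String) (acc : String × Int)
    (hBV : PySem.Str.isIn "BENH VIEN" s = true) (hle : acc.2 ≤ PySem.Str.len s)
    (hlm : pvLastMatch d s = none) :
    d.foldl (fun (acc2 : String × Int) kv =>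
      if acc2.2 ≤ PySem.Str.len s ∧ PySem.Str.isIn "BENH VIEN" s = true then
        if PySem.Str.isIn s kv.1 = true ∨ PySem.Str.isIn kv.1 s = true then
          (kv.2, PySem.Str.len s)
        else acc2
      else acc2) acc = acc := by
  rw [pvInner_live d s acc hBV hle, hlm]

theorem pvQual_cons_some (d : List (String × String)) (s : String) (l : List String) (v : String)
    (hBV : PySem.Str.isIn "BENH VIEN" s = true) (hlm : pvLastMatch d s = some v) :
    pvQual d (s :: l) = (s, v) :: pvQual d l := by
  simp only [pvQual, List.filterMap_cons]
  rw [if_pos hBV, hlm]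
  rfl

theorem pvQual_cons_none (d : List (String × String)) (s : String) (l : List String)
    (hBV : PySem.Str.isIn "BENH VIEN" s = true) (hlm : pvLastMatch d s = none) :
    pvQual d (s :: l) = pvQual d l := by
  simp only [pvQual, List.filterMap_cons]
  rw [if_pos hBV, hlm]
  rfl

theorem pvQual_cons_notBV (d : List (String × String)) (s : String) (l : List String)
    (hBV : ¬ PySem.Str.isIn "BENH VIEN" s = true) :
    pvQual d (s :: l) = pvQual d l := by
  simp only [pvQual, List.filterMap_cons]
  rw [if_neg hBV]

theorem pvStep_le (acc : String × Int) (p : String × String) (h : acc.2 ≤ PySem.Str.len p.1) :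
    pvStep acc p = (p.2, PySem.Str.len p.1) := if_pos h

theorem pvStep_gt (acc : String × Int) (p : String × String) (h : ¬ acc.2 ≤ PySem.Str.len p.1) :
    pvStep acc p = acc := if_neg h

-- A's outer loop equals folding pvStep over the qualifier list
theorem pvOuter (l : List String) (d : List (String × String)) (acc : String × Int) :
    l.foldl (fun (acc : String × Int) string =>
      d.foldl (fun (acc2 : String × Int) kv =>
        if acc2.2 ≤ PySem.Str.len string ∧ PySem.Str.isIn "BENH VIEN" string = true then
          if PySem.Str.isIn string kv.1 = true ∨ PySem.Str.isIn kv.1 string = true then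
            (kv.2, PySem.Str.len string)
          else acc2
        else acc2) acc) acc
      = (pvQual d l).foldl pvStep acc := by
  induction l generalizing acc with
  | nil => rfl
  | cons s l ih =>
      rw [List.foldl_cons]
      by_cases hBV : PySem.Str.isIn "BENH VIEN" s = true
      · by_cases hle : acc.2 ≤ PySem.Str.len s
        · cases hlm : pvLastMatch d s with
          | some v =>
              rw [pvInner_live_some d s acc v hBV hle hlm, pvQual_cons_some d s l v hBV hlm,
                List.foldl_cons, pvStep_le acc (s, v) hle]
              exact ih (v, PySem.Str.len s)
          | none =>
              rw [pvInner_live_none d s acc hBV hle hlm, pvQual_cons_none d s l hBV hlm]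
              exact ih acc
        · rw [pvInner_gt d s acc hle]
          cases hlm : pvLastMatch d s with
          | some v =>
              rw [pvQual_cons_some d s l v hBV hlm, List.foldl_cons, pvStep_gt acc (s, v) hle]
              exact ih acc
          | none =>
              rw [pvQual_cons_none d s l hBV hlm]
              exact ih acc
      · rw [pvInner_notBV d s acc hBV, pvQual_cons_notBV d s l hBV]
        exact ih acc

-- B's loop builds exactly the qualifier list
theorem pvBuild (l : List String) (d : List (String × String)) (q0 : List (String × String)) :
    l.foldl (fun q s =>
      if PySem.Str.isIn "BENH VIEN" s = true then
        match pvLastMatch d s with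
        | some v => q ++ [(s, v)]
        | none => q
      else q) q0 = q0 ++ pvQual d l := by
  induction l generalizing q0 with
  | nil => rw [List.foldl_nil, pvQual, List.filterMap_nil, List.append_nil]
  | cons s l ih =>
      rw [List.foldl_cons]
      by_cases hBV : PySem.Str.isIn "BENH VIEN" s = true
      · rw [if_pos hBV]
        cases hlm : pvLastMatch d s with
        | some v =>
            rw [pvQual_cons_some d s l v hBV hlm, ih (q0 ++ [(s, v)]), List.append_assoc]
            rfl
        | none =>
            rw [pvQual_cons_none d s l hBV hlm]
            exact ih q0
      · rw [if_neg hBV, pvQual_cons_notBV d s l hBV]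
        exact ih q0

-- folding pvStep from ("",0) computes (pick, max) of the qualifier list
theorem pvFold_step (q : List (String × String)) :
    q.foldl pvStep ("", 0) = (pvPick q (pvMax q), pvMax q) := by
  induction q using List.reverseRecOn with
  | nil => rfl
  | append_singleton q x ih =>
      rw [List.foldl_append, ih, List.foldl_cons, List.foldl_nil]
      have hmax : pvMax (q ++ [x]) = max (pvMax q) (PySem.Str.len x.1) := by
        unfold pvMax
        rw [List.map_append, List.foldl_append]
        rfl
      by_cases hle : pvMax q ≤ PySem.Str.len x.1
      · have hm : pvMax (q ++ [x]) = PySem.Str.len x.1 := by rw [hmax]; exact max_eq_right hle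
        have hpick : pvPick (q ++ [x]) (PySem.Str.len x.1) = x.2 := by
          unfold pvPick
          rw [List.foldl_append, List.foldl_cons, List.foldl_nil]
          exact if_pos rfl
        rw [pvStep_le (pvPick q (pvMax q), pvMax q) x hle, hm, hpick]
      · have hlt : PySem.Str.len x.1 < pvMax q := not_le.mp hle
        have hm : pvMax (q ++ [x]) = pvMax q := by rw [hmax]; exact max_eq_left (le_of_lt hlt)
        have hpick : pvPick (q ++ [x]) (pvMax q) = pvPick q (pvMax q) := by
          unfold pvPick
          rw [List.foldl_append, List.foldl_cons, List.foldl_nil]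
          exact if_neg (ne_of_lt hlt)
        rw [pvStep_gt (pvPick q (pvMax q), pvMax q) x hle, hm, hpick]

-- ===== VERDICT (by name: the statement is the Claim_ definition above) =====
theorem get_hospital_name_spec : Claim_equal_get_hospital_name := by
  intro str_list hos_dict res_string_list _
  unfold Spec_get_hospital_name
  simp only [get_hospital_name, get_hospital_name_alt]
  rw [pvOuter str_list hos_dict ("", 0), pvBuild str_list hos_dict [], List.nil_append,
    pvFold_step]
  by_cases hq : pvQual hos_dict str_list = []
  · rw [hq, if_pos rfl]
    rfl
  · rw [if_neg hq]
    rfl
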